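-- pv_equiv track=rewrite | github.com/MariiaNikitash/DSA | CodePath_TIP103/dicts/sesh2.py | is_authentic_collection
-- ===== SOURCE A (Python) =====
-- def is_authentic_collection(art_pieces):
--     # find max value n, n should appear twice, and len of array is n + 1
--     # count freqs
--     # find max if freq is
--     d = {}
--     len_art = len(art_pieces)
--     max_art = max(art_pieces)
--     if len_art != max_art+1:
--         return False
--     for art in art_pieces:
--         d[art] = d.get(art, 0) + 1
--
--     if d[max_art] != 2:
--         return False
--
--     for val in range(1, max_art):
--         if d.get(val, 0) !=1:
--             return False
--     return True
-- ===== SOURCE B (Python) =====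
-- def is_authentic_collection(art_pieces):
--     # A collection is authentic iff it is a rearrangement of 1..n with the max n doubled:
--     # after a cheap length check, sort and compare against that single canonical arrangement.
--     n = max(art_pieces)
--     if len(art_pieces) != n + 1:
--         return False
--     return sorted(art_pieces) == list(range(1, n)) + [n, n]
-- ===== Notes on version B (the rewrite author's own statement) =====
-- stated objective: simpler
-- what changed: B sorts the list and compares it with the single canonical arrangement [1,..,n-1,n,n] (n = max) instead of building a frequency dict and scanning a range of counts.
import Mathlib
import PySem

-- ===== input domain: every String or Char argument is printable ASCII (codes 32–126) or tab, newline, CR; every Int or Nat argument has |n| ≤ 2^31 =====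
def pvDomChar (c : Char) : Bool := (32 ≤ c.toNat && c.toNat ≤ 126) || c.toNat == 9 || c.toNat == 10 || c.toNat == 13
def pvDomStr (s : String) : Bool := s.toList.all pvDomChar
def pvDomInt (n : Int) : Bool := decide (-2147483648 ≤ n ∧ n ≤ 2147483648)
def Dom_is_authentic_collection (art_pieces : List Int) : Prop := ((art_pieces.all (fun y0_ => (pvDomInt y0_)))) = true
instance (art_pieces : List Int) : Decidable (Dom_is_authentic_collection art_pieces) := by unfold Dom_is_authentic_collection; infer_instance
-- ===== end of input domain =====

-- B replaces A's frequency-dict-and-range-scan by sorting the input and comparing it with the single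
-- canonical arrangement [1,…,n-1,n,n] (n = max); objective: simpler.

-- ===== PORT A =====
def is_authentic_collection (art_pieces : List Int) : Bool :=
  match PySem.List.max? art_pieces (fun x => x) with
  | none => false   -- max([]) raises ValueError; excluded by Pre_
  | some max_art =>
    let len_art : Int := art_pieces.length
    if len_art ≠ max_art + 1 then false
    else
      let d : PySem.Dict Int Int :=
        art_pieces.foldl (fun d art => d.insert art (d.getD art 0 + 1)) PySem.Dict.empty
      -- d[max_art]: the key is always present here (max_art ∈ art_pieces), so getD is exact
      if d.getD max_art 0 ≠ 2 then false
      else (PySem.List.pyRange 1 max_art).all (fun val => d.getD val 0 == 1)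

-- ===== PORT B =====
def is_authentic_collection_alt (art_pieces : List Int) : Bool :=
  match PySem.List.max? art_pieces (fun x => x) with
  | none => false   -- max([]) raises ValueError; excluded by Pre_
  | some n =>
      if (art_pieces.length : Int) ≠ n + 1 then false
      else PySem.List.sorted art_pieces (fun x => x) false == PySem.List.pyRange 1 n ++ [n, n]

-- ===== PRECONDITION & SPEC =====
-- Pre_ excludes exactly the empty list, on which Python A (and B) raise ValueError from max([]).
def Pre_is_authentic_collection (art_pieces : List Int) : Prop := art_pieces ≠ []
instance (art_pieces : List Int) : Decidable (Pre_is_authentic_collection art_pieces) := by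
  unfold Pre_is_authentic_collection; infer_instance
def pvWitness_is_authentic_collection : List Int := ([1, 2, 2])

def Spec_is_authentic_collection (art_pieces : List Int) (out : Bool) : Prop := out = is_authentic_collection_alt art_pieces
instance (art_pieces : List Int) (out : Bool) : Decidable (Spec_is_authentic_collection art_pieces out) := by unfold Spec_is_authentic_collection; infer_instance

-- ===== CLAIM (what is proved, stated in full; the proofs are below) =====
def Claim_equal_is_authentic_collection : Prop := ∀ (art_pieces : List Int), Dom_is_authentic_collection art_pieces → Pre_is_authentic_collection art_pieces → Spec_is_authentic_collection art_pieces (is_authentic_collection art_pieces)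

-- ===== LEMMAS AND PROOFS =====

-- pyRange a b with step 1 is a shifted List.range
lemma pyRange_one_eq_map (a b : Int) :
    PySem.List.pyRange a b = (List.range (b - a).toNat).map (fun k : Nat => a + (k : Int)) := by
  simp only [PySem.List.pyRange]
  norm_num
  have h : (if a < b then (b - a).toNat else 0) = (b - a).toNat := by
    split_ifs with h
    · rfl
    · omega
  rw [h]

lemma length_pyRange_one (a b : Int) :
    (PySem.List.pyRange a b).length = (b - a).toNat := by
  simp [pyRange_one_eq_map]

lemma pairwise_lt_pyRange_one (a b : Int) :
    (PySem.List.pyRange a b).Pairwise (· < ·) := by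
  rw [pyRange_one_eq_map]
  rw [List.pairwise_map]
  exact List.pairwise_lt_range.imp (fun {x y} h => by omega)

lemma nodup_pyRange_one (a b : Int) : (PySem.List.pyRange a b).Nodup :=
  (pairwise_lt_pyRange_one a b).imp (fun h => by omega)

lemma count_pyRange_one (a b v : Int) :
    (PySem.List.pyRange a b).count v = if a ≤ v ∧ v < b then 1 else 0 := by
  split_ifs with h
  · exact List.count_eq_one_of_mem (nodup_pyRange_one a b) (PySem.List.mem_pyRange_one.2 h)
  · exact List.count_eq_zero_of_not_mem (fun hm => h (PySem.List.mem_pyRange_one.1 hm))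

-- the canonical arrangement is weakly increasing
lemma pairwise_le_expected (n : Int) :
    (PySem.List.pyRange 1 n ++ [n, n]).Pairwise (· ≤ ·) := by
  rw [List.pairwise_append]
  refine ⟨(pairwise_lt_pyRange_one 1 n).imp (fun h => le_of_lt h), by simp, ?_⟩
  intro x hx y hy
  have hx' := (PySem.List.mem_pyRange_one.1 hx).2
  simp at hy
  omega

lemma count_expected (n v : Int) :
    (PySem.List.pyRange 1 n ++ [n, n]).count v =
      (if 1 ≤ v ∧ v < n then 1 else 0) + (if v = n then 2 else 0) := by
  rw [List.count_append, count_pyRange_one]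
  rcases eq_or_ne v n with rfl | h
  · simp
  · simp [h, h.symm]

-- core equivalence of the two post-max computations
lemma core (xs : List Int) (n : Int) :
    (if (xs.length : Int) ≠ n + 1 then false
     else if (xs.count n : Int) ≠ 2 then false
     else (PySem.List.pyRange 1 n).all (fun v => ((xs.count v : Int)) == 1))
    = (if (xs.length : Int) ≠ n + 1 then false
       else PySem.List.sorted xs (fun x => x) false == PySem.List.pyRange 1 n ++ [n, n]) := by
  have eperm : PySem.List.sorted xs (fun x => x) false = PySem.List.pyRange 1 n ++ [n, n] →
      (PySem.List.pyRange 1 n ++ [n, n]).Perm xs := by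
    intro h
    exact h ▸ PySem.List.sorted_perm xs (fun x => x) false
  have elen : (PySem.List.pyRange 1 n ++ [n, n]).length = (n - 1).toNat + 2 := by
    rw [List.length_append, length_pyRange_one]
    rfl
  by_cases h1 : (xs.length : Int) = n + 1
  · rw [if_neg (not_not_intro h1), if_neg (not_not_intro h1)]
    by_cases h2 : (xs.count n : Int) = 2
    · rw [if_neg (not_not_intro h2), Bool.eq_iff_iff]
      simp only [List.all_eq_true, beq_iff_eq]
      constructor
      · intro hall
        have hn1 : 1 ≤ n := by
          have hle := List.count_le_length (a := n) (l := xs)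
          omega
        have hmle : ((PySem.List.pyRange 1 n ++ [n, n] : List Int) : Multiset Int) ≤
            (xs : Multiset Int) := by
          rw [Multiset.le_iff_count]
          intro v
          simp only [Multiset.coe_count]
          rw [count_expected]
          rcases eq_or_ne v n with rfl | hv
          · rw [if_neg (by omega), if_pos rfl]
            omega
          · by_cases hv2 : 1 ≤ v ∧ v < n
            · rw [if_pos hv2, if_neg hv]
              have := hall v (PySem.List.mem_pyRange_one.2 hv2)
              omega
            · rw [if_neg hv2, if_neg hv]
              omega
        have hcard : (xs : Multiset Int).card ≤
            ((PySem.List.pyRange 1 n ++ [n, n] : List Int) : Multiset Int).card := by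
          simp only [Multiset.coe_card, elen]
          omega
        have hperm : (PySem.List.pyRange 1 n ++ [n, n]).Perm xs :=
          Multiset.coe_eq_coe.1 (Multiset.eq_of_le_of_card_le hmle hcard)
        exact PySem.List.sorted_id_eq_of_perm_of_pairwise xs _ hperm (pairwise_le_expected n)
      · intro hs v hv
        have hc := (eperm hs).count_eq v
        rw [count_expected] at hc
        have hv' := PySem.List.mem_pyRange_one.1 hv
        rw [if_pos hv', if_neg (by omega)] at hc
        omega
    · rw [if_pos h2, Bool.eq_iff_iff]
      simp only [Bool.false_eq_true, false_iff, beq_iff_eq]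
      intro hs
      have hc := (eperm hs).count_eq n
      rw [count_expected, if_neg (by omega), if_pos rfl] at hc
      omega
  · rw [if_pos h1, if_pos h1]

-- ===== VERDICT (by name: the statement is the Claim_ definition above) =====
theorem is_authentic_collection_spec : Claim_equal_is_authentic_collection := by
  intro xs _ hpre
  unfold Spec_is_authentic_collection is_authentic_collection is_authentic_collection_alt
  cases h : PySem.List.max? xs (fun x => x) with
  | none => exact absurd ((PySem.List.max?_eq_none_iff xs _).1 h) hpre
  | some n =>
      simp only [PySem.Dict.getD_foldl_insert_add_one, PySem.Dict.getD_empty, zero_add]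
      exact core xs n
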